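-- pv_equiv track=rewrite | github.com/miko7879/programming_problems | Interview Bit/Arrays/minLights.py | minLights
-- ===== SOURCE A (Python) =====
-- def getLamp(A, min_i, i):
--
--     i = min(i, len(A) - 1)
--
--     while i >= min_i:
--         if A[i] == 1:
--             return i
--         i -= 1
--
--     return -1
--
-- def minLights(A, B):
--
--     cover = B - 1
--
--     start = getLamp(A, 0, cover)
--
--     if start == -1:
--         return -1
--
--     min_steps = 1
--
--     while start + cover < len(A) - 1:
--         start = getLamp(A, start + 1, start + 2*cover + 1)
--         if start == -1:
--             return -1
--         min_steps += 1
--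
--     return min_steps
-- ===== SOURCE B (Python) =====
-- def minLights(A, B):
--     n = len(A)
--     cover = B - 1
--     covered = -1   # rightmost street index already covered
--     i = 0          # monotone forward pointer over lamp positions
--     steps = 0
--     while covered < n - 1:
--         limit = covered + 1 + cover   # rightmost lamp index able to cover position covered+1
--         best = -1
--         while i < n and i <= limit:
--             if A[i] == 1:
--                 best = i
--             i += 1
--         if best == -1:
--             return -1
--         covered = best + cover
--         steps += 1
--     return steps
-- ===== Notes on version B (the rewrite author's own statement) =====
-- stated objective: alternative
-- what changed: Replaces A's repeated backward window scans (a fresh right-to-left getLamp pass per step, revisiting overlapping window elements) by a single monotone forward sweep whose pointer never revisits an index, maintaining (covered, best).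
-- intended difference: On the empty list A returns -1 because its initial lamp search fails, while B returns 0, the intended value: an empty street needs no lamps. — e.g. on minLights([], 1): A returns -1, B returns 0
import Mathlib
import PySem

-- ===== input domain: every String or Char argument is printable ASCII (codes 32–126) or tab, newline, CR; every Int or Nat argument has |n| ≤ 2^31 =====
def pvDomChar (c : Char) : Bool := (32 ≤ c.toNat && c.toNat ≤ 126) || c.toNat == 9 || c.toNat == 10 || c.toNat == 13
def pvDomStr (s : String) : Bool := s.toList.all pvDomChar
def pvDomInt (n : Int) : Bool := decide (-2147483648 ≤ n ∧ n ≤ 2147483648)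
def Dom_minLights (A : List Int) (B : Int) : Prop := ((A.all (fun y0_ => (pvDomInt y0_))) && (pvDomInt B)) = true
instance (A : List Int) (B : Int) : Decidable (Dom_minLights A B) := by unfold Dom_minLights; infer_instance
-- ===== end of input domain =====

-- B replaces A's repeated backward window scans by one monotone forward sweep with a single
-- pointer (objective: alternative single-pass greedy); on the empty street A returns -1, B returns 0.
-- Loops are ported as structural recursion on an explicit fuel that provably exceeds the
-- iteration count (a totality guard only; the lemmas below prove the fuel never runs out).

-- ===== PORT A =====
-- the 'while i >= min_i' downward scan of getLamp (after the 'i = min(i, len(A)-1)' clamp)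
def getLampLoop (A : List Int) (min_i : Int) : Nat → Int → Int
  | 0, _ => -1
  | f + 1, i =>
      if min_i ≤ i then
        if PySem.List.pyGet? A i = some 1 then i else getLampLoop A min_i f (i - 1)
      else -1

def getLamp (A : List Int) (min_i i : Int) : Int :=
  getLampLoop A min_i ((min i ((A.length : Int) - 1) - min_i + 1).toNat + 1)
    (min i ((A.length : Int) - 1))

-- the 'while start + cover < len(A) - 1' loop of minLights
def minLightsLoop (A : List Int) (cover : Int) : Nat → Int → Int → Int
  | 0, _, min_steps => min_steps
  | f + 1, start, min_steps =>
      if start + cover < (A.length : Int) - 1 then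
        if getLamp A (start + 1) (start + 2 * cover + 1) = -1 then -1
        else minLightsLoop A cover f (getLamp A (start + 1) (start + 2 * cover + 1)) (min_steps + 1)
      else min_steps

def minLights (A : List Int) (B : Int) : Int :=
  let cover := B - 1
  let start := getLamp A 0 cover
  if start = -1 then -1
  else minLightsLoop A cover (A.length + 1) start 1

-- ===== PORT B =====
-- the inner 'while i < n and i <= limit' sweep: returns (new i, best lamp found, else the incoming best)
def scanLoop (A : List Int) (limit : Int) : Nat → Int → Int → Int × Int
  | 0, i, best => (i, best)
  | f + 1, i, best =>
      if i < (A.length : Int) ∧ i ≤ limit then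
        scanLoop A limit f (i + 1) (if PySem.List.pyGet? A i = some 1 then i else best)
      else (i, best)

-- the outer 'while covered < n - 1' loop
def altLoop (A : List Int) (cover : Int) : Nat → Int → Int → Int → Int
  | 0, _, _, steps => steps
  | f + 1, covered, i, steps =>
      if covered < (A.length : Int) - 1 then
        if (scanLoop A (covered + 1 + cover) (A.length + 1) i (-1)).2 = -1 then -1
        else altLoop A cover f
          ((scanLoop A (covered + 1 + cover) (A.length + 1) i (-1)).2 + cover)
          (scanLoop A (covered + 1 + cover) (A.length + 1) i (-1)).1 (steps + 1)
      else steps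

def minLights_alt (A : List Int) (B : Int) : Int :=
  altLoop A (B - 1) (A.length + 1) (-1) 0 0

-- ===== PRECONDITION & SPEC =====
-- On the empty street A returns -1 ('impossible') because its initial lamp search fails; B returns 0,
-- the intended value: an empty street needs no lamps.
def D_minLights (A : List Int) (B : Int) : Prop := A = []
instance (A : List Int) (B : Int) : Decidable (D_minLights A B) := by unfold D_minLights; infer_instance
def Spec_minLights (A : List Int) (B : Int) (out : Int) : Prop := ¬ D_minLights A B → out = minLights_alt A B
instance (A : List Int) (B : Int) (out : Int) : Decidable (Spec_minLights A B out) := by unfold Spec_minLights; infer_instance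
def pvDiffWitness_minLights : List Int × Int := ([], 1)
def pvDiffWitnessOut_minLights : Int × Int := (-1, 0)

-- ===== CLAIM (what is proved, stated in full; the proofs are below) =====
def Claim_unchanged_minLights : Prop := ∀ (A : List Int) (B : Int), Dom_minLights A B → Spec_minLights A B (minLights A B)
def Claim_changed_minLights : Prop := Dom_minLights (pvDiffWitness_minLights.1) (pvDiffWitness_minLights.2) ∧ D_minLights (pvDiffWitness_minLights.1) (pvDiffWitness_minLights.2) ∧ minLights (pvDiffWitness_minLights.1) (pvDiffWitness_minLights.2) = pvDiffWitnessOut_minLights.1 ∧ minLights_alt (pvDiffWitness_minLights.1) (pvDiffWitness_minLights.2) = pvDiffWitnessOut_minLights.2 ∧ pvDiffWitnessOut_minLights.1 ≠ pvDiffWitnessOut_minLights.2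
def Claim_exact_minLights : Prop := ∀ (A : List Int) (B : Int), Dom_minLights A B → D_minLights A B → minLights A B ≠ minLights_alt A B

-- ===== LEMMAS AND PROOFS =====

-- fuel irrelevance for the downward scan
theorem gll_irrel (A : List Int) (min_i : Int) : ∀ (f g : Nat) (i : Int),
    (i - min_i + 1).toNat < f → (i - min_i + 1).toNat < g →
    getLampLoop A min_i f i = getLampLoop A min_i g i := by
  intro f
  induction f with
  | zero => intro g i hf hg; omega
  | succ f ih =>
      intro g i hf hg
      cases g with
      | zero => omega
      | succ g =>
          simp only [getLampLoop]
          by_cases h : min_i ≤ i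
          · simp only [if_pos h]
            by_cases hA : PySem.List.pyGet? A i = some 1
            · simp [hA]
            · simp only [if_neg hA]
              exact ih g (i - 1) (by omega) (by omega)
          · simp [h]

-- the downward scan with its canonical (always-sufficient) fuel
def Gl (A : List Int) (lo hi : Int) : Int :=
  getLampLoop A lo ((hi - lo + 1).toNat + 1) hi

theorem getLamp_as_Gl (A : List Int) (min_i i : Int) :
    getLamp A min_i i = Gl A min_i (min i ((A.length : Int) - 1)) := rfl

theorem Gl_neg (A : List Int) (lo hi : Int) (h : ¬ lo ≤ hi) : Gl A lo hi = -1 := by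
  simp [Gl, getLampLoop, h]

theorem Gl_pos (A : List Int) (lo hi : Int) (h : lo ≤ hi) :
    Gl A lo hi = if PySem.List.pyGet? A hi = some 1 then hi else Gl A lo (hi - 1) := by
  show getLampLoop A lo ((hi - lo + 1).toNat + 1) hi = _
  simp only [getLampLoop, if_pos h]
  by_cases hA : PySem.List.pyGet? A hi = some 1
  · simp [hA]
  · simp only [if_neg hA]
    exact gll_irrel A lo _ _ (hi - 1) (by omega) (by omega)

theorem Gl_bounds (A : List Int) (lo : Int) : ∀ (hi : Int),
    Gl A lo hi = -1 ∨ (lo ≤ Gl A lo hi ∧ Gl A lo hi ≤ hi) := by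
  have H : ∀ (k : Nat) (hi : Int), (hi - lo + 1).toNat ≤ k →
      Gl A lo hi = -1 ∨ (lo ≤ Gl A lo hi ∧ Gl A lo hi ≤ hi) := by
    intro k
    induction k with
    | zero => intro hi hk; left; exact Gl_neg A lo hi (by omega)
    | succ k ih =>
        intro hi hk
        by_cases h : lo ≤ hi
        · rw [Gl_pos A lo hi h]
          by_cases hA : PySem.List.pyGet? A hi = some 1
          · right; simp [hA]; omega
          · simp only [if_neg hA]
            rcases ih (hi - 1) (by omega) with h1 | ⟨h2, h3⟩
            · left; exact h1
            · right; omega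
        · left; exact Gl_neg A lo hi h
  exact fun hi => H _ hi le_rfl

-- peeling the BOTTOM element off the downward scan
theorem Gl_left_peel (A : List Int) (lo : Int) (h0 : 0 ≤ lo) : ∀ (hi : Int), lo ≤ hi →
    Gl A lo hi =
      (if Gl A (lo + 1) hi = -1
       then (if PySem.List.pyGet? A lo = some 1 then lo else -1)
       else Gl A (lo + 1) hi) := by
  have H : ∀ (k : Nat) (hi : Int), (hi - lo + 1).toNat ≤ k → lo ≤ hi →
      Gl A lo hi =
        (if Gl A (lo + 1) hi = -1
         then (if PySem.List.pyGet? A lo = some 1 then lo else -1)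
         else Gl A (lo + 1) hi) := by
    intro k
    induction k with
    | zero => intro hi hk hlh; omega
    | succ k ih =>
        intro hi hk hlh
        rw [Gl_pos A lo hi hlh]
        by_cases hg : PySem.List.pyGet? A hi = some 1
        · simp only [if_pos hg]
          by_cases h1 : lo + 1 ≤ hi
          · rw [Gl_pos A (lo + 1) hi h1, if_pos hg]
            have : ¬ hi = -1 := by omega
            simp [this]
          · have hl : lo = hi := by omega
            rw [Gl_neg A (lo + 1) hi (by omega)]
            subst hl
            simp [hg]
        · simp only [if_neg hg]
          by_cases h1 : lo + 1 ≤ hi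
          · rw [Gl_pos A (lo + 1) hi h1, if_neg hg]
            exact ih (hi - 1) (by omega) (by omega)
          · have hl : lo = hi := by omega
            rw [Gl_neg A (lo + 1) hi (by omega)]
            rw [Gl_neg A lo (hi - 1) (by omega)]
            subst hl
            simp [hg]
  exact fun hi => H _ hi le_rfl

-- fuel irrelevance for the forward sweep
theorem sll_irrel (A : List Int) (limit : Int) : ∀ (f g : Nat) (i b : Int),
    ((A.length : Int) - i).toNat < f → ((A.length : Int) - i).toNat < g →
    scanLoop A limit f i b = scanLoop A limit g i b := by
  intro f
  induction f with
  | zero => intro g i b hf hg; omega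
  | succ f ih =>
      intro g i b hf hg
      cases g with
      | zero => omega
      | succ g =>
          simp only [scanLoop]
          by_cases h : i < (A.length : Int) ∧ i ≤ limit
          · simp only [if_pos h]
            exact ih g (i + 1) _ (by omega) (by omega)
          · simp [h]

-- the forward sweep with its canonical fuel
def SL (A : List Int) (limit i b : Int) : Int × Int :=
  scanLoop A limit (((A.length : Int) - i).toNat + 1) i b

theorem scanAtLen (A : List Int) (limit i b : Int) (h0 : 0 ≤ i) :
    scanLoop A limit (A.length + 1) i b = SL A limit i b :=
  sll_irrel A limit _ _ i b (by omega) (by omega)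

theorem SL_stop (A : List Int) (limit i b : Int)
    (h : ¬(i < (A.length : Int) ∧ i ≤ limit)) : SL A limit i b = (i, b) := by
  simp [SL, scanLoop, h]

theorem SL_step (A : List Int) (limit i b : Int)
    (h : i < (A.length : Int) ∧ i ≤ limit) :
    SL A limit i b = SL A limit (i + 1) (if PySem.List.pyGet? A i = some 1 then i else b) := by
  show scanLoop A limit (((A.length : Int) - i).toNat + 1) i b = _
  simp only [scanLoop, if_pos h]
  exact sll_irrel A limit _ _ (i + 1) _ (by omega) (by omega)

-- closed form of the final pointer
theorem SL_fst (A : List Int) (limit : Int) : ∀ (i b : Int),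
    (SL A limit i b).1 = max i (min (A.length : Int) (limit + 1)) := by
  have H : ∀ (k : Nat) (i b : Int), ((A.length : Int) - i).toNat ≤ k →
      (SL A limit i b).1 = max i (min (A.length : Int) (limit + 1)) := by
    intro k
    induction k with
    | zero =>
        intro i b hk
        have h : ¬(i < (A.length : Int) ∧ i ≤ limit) := by omega
        rw [SL_stop A limit i b h]; omega
    | succ k ih =>
        intro i b hk
        by_cases h : i < (A.length : Int) ∧ i ≤ limit
        · rw [SL_step A limit i b h, ih (i + 1) _ (by omega)]; omega
        · rw [SL_stop A limit i b h]; omega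
  exact fun i b => H _ i b le_rfl

-- B's forward sweep computes A's backward scan (with fallback best when no lamp in the window)
theorem SL_snd_eq (A : List Int) (limit : Int) : ∀ (i b : Int), 0 ≤ i →
    (SL A limit i b).2 =
      (if Gl A i (min limit ((A.length : Int) - 1)) = -1 then b
       else Gl A i (min limit ((A.length : Int) - 1))) := by
  have H : ∀ (k : Nat) (i b : Int), ((A.length : Int) - i).toNat ≤ k → 0 ≤ i →
      (SL A limit i b).2 =
        (if Gl A i (min limit ((A.length : Int) - 1)) = -1 then b
         else Gl A i (min limit ((A.length : Int) - 1))) := by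
    intro k
    induction k with
    | zero =>
        intro i b hk h0
        have hc : ¬(i < (A.length : Int) ∧ i ≤ limit) := by omega
        rw [SL_stop A limit i b hc, Gl_neg A i _ (by omega)]
        simp
    | succ k ih =>
        intro i b hk h0
        by_cases hc : i < (A.length : Int) ∧ i ≤ limit
        · rw [SL_step A limit i b hc]
          rw [ih (i + 1) _ (by omega) (by omega)]
          rw [Gl_left_peel A i h0 (min limit ((A.length : Int) - 1)) (by omega)]
          by_cases hg' : Gl A (i + 1) (min limit ((A.length : Int) - 1)) = -1
          · simp only [hg']
            by_cases hA : PySem.List.pyGet? A i = some 1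
            · have : ¬ i = -1 := by omega
              simp [hA, this]
            · simp [hA]
          · simp [hg']
        · rw [SL_stop A limit i b hc, Gl_neg A i _ (by omega)]
          simp
  exact fun i b => H _ i b le_rfl

-- a fully lamp-free window scans to -1
theorem Gl_none (A : List Int) (lo : Int) : ∀ (hi : Int),
    (∀ j : Int, lo ≤ j → j ≤ hi → ¬ PySem.List.pyGet? A j = some 1) →
    Gl A lo hi = -1 := by
  have H : ∀ (k : Nat) (hi : Int), (hi - lo + 1).toNat ≤ k →
      (∀ j : Int, lo ≤ j → j ≤ hi → ¬ PySem.List.pyGet? A j = some 1) →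
      Gl A lo hi = -1 := by
    intro k
    induction k with
    | zero => intro hi hk hfree; exact Gl_neg A lo hi (by omega)
    | succ k ih =>
        intro hi hk hfree
        by_cases hlh : lo ≤ hi
        · rw [Gl_pos A lo hi hlh, if_neg (hfree hi hlh le_rfl)]
          exact ih (hi - 1) (by omega) (fun j h1 h2 => hfree j h1 (by omega))
        · exact Gl_neg A lo hi hlh
  exact fun hi => H _ hi le_rfl

-- raising the lower bound across a lamp-free zone does not change the scan
theorem Gl_shift (A : List Int) (lo lo' : Int) (hll : lo ≤ lo')
    (hfree : ∀ j : Int, lo ≤ j → j < lo' → ¬ PySem.List.pyGet? A j = some 1) :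
    ∀ (hi : Int), Gl A lo hi = Gl A lo' hi := by
  have H : ∀ (k : Nat) (hi : Int), (hi - lo' + 1).toNat ≤ k →
      Gl A lo hi = Gl A lo' hi := by
    intro k
    induction k with
    | zero =>
        intro hi hk
        rw [Gl_neg A lo' hi (by omega)]
        exact Gl_none A lo hi (fun j h1 h2 => hfree j h1 (by omega))
    | succ k ih =>
        intro hi hk
        by_cases hlh : lo' ≤ hi
        · rw [Gl_pos A lo hi (by omega), Gl_pos A lo' hi hlh]
          by_cases hg : PySem.List.pyGet? A hi = some 1
          · simp [hg]
          · simp only [if_neg hg]; exact ih (hi - 1) (by omega)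
        · rw [Gl_neg A lo' hi hlh]
          exact Gl_none A lo hi (fun j h1 h2 => hfree j h1 (by omega))
  exact fun hi => H _ hi le_rfl

-- everything strictly above the scan's result (inside the window) is lamp-free
theorem Gl_above (A : List Int) (lo j : Int) : ∀ (hi : Int), lo ≤ j → j ≤ hi →
    Gl A lo hi < j → ¬ PySem.List.pyGet? A j = some 1 := by
  have H : ∀ (k : Nat) (hi : Int), (hi - lo + 1).toNat ≤ k → lo ≤ j → j ≤ hi →
      Gl A lo hi < j → ¬ PySem.List.pyGet? A j = some 1 := by
    intro k
    induction k with
    | zero => intro hi hk h1 h2 h3; omega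
    | succ k ih =>
        intro hi hk h1 h2 h3
        rw [Gl_pos A lo hi (by omega)] at h3
        by_cases hg : PySem.List.pyGet? A hi = some 1
        · rw [if_pos hg] at h3; omega
        · rw [if_neg hg] at h3
          by_cases hj : j = hi
          · subst hj; exact hg
          · exact ih (hi - 1) (by omega) h1 (by omega) h3
  exact fun hi => H _ hi le_rfl

-- main loop correspondence: A's (start, steps) state vs B's (covered = start+cover, i, steps) state
theorem loop_eq (A : List Int) (cover : Int) : ∀ (fA fB : Nat) (i start steps : Int),
    0 ≤ start → start + 1 ≤ i → i ≤ (A.length : Int) →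
    (∀ j : Int, start < j → j < i → ¬ PySem.List.pyGet? A j = some 1) →
    ((A.length : Int) - start).toNat < fA → ((A.length : Int) - i).toNat < fB →
    minLightsLoop A cover fA start steps = altLoop A cover fB (start + cover) i steps := by
  intro fA
  induction fA with
  | zero => intro fB i start steps _ _ _ _ hfa _; omega
  | succ fA ih =>
      intro fB i start steps h0 h1 h2 hfree hfa hfb
      cases fB with
      | zero => omega
      | succ gB =>
          simp only [minLightsLoop, altLoop]
          by_cases hc : start + cover < (A.length : Int) - 1
          · simp only [if_pos hc]
            have hlim : start + cover + 1 + cover = start + 2 * cover + 1 := by ring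
            rw [hlim]
            rw [scanAtLen A (start + 2 * cover + 1) i (-1) (by omega)]
            have hgi : Gl A i (min (start + 2 * cover + 1) ((A.length : Int) - 1))
                = getLamp A (start + 1) (start + 2 * cover + 1) := by
              rw [getLamp_as_Gl]
              exact (Gl_shift A (start + 1) i (by omega)
                (fun j ha hb => hfree j (by omega) hb) _).symm
            have hq : (SL A (start + 2 * cover + 1) i (-1)).2 =
                (if getLamp A (start + 1) (start + 2 * cover + 1) = -1 then -1
                 else getLamp A (start + 1) (start + 2 * cover + 1)) := by
              rw [SL_snd_eq A _ i (-1) (by omega), hgi]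
            by_cases hs : getLamp A (start + 1) (start + 2 * cover + 1) = -1
            · rw [if_pos hs, hq, if_pos hs]; simp
            · have hq2 : (SL A (start + 2 * cover + 1) i (-1)).2 =
                  getLamp A (start + 1) (start + 2 * cover + 1) := by rw [hq, if_neg hs]
              rw [if_neg hs, hq2, if_neg hs]
              -- bounds on s from the A-side window
              have hb' := Gl_bounds A (start + 1) (min (start + 2 * cover + 1) ((A.length : Int) - 1))
              rw [← getLamp_as_Gl] at hb'
              rcases hb' with hb' | ⟨hb1, hb2⟩
              · exact absurd hb' hs
              -- the scan must have run
              have hcond : i < (A.length : Int) ∧ i ≤ start + 2 * cover + 1 := by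
                by_contra hcond
                rw [SL_stop A _ i (-1) hcond] at hq2
                exact hs hq2.symm
              have hp1 : (SL A (start + 2 * cover + 1) i (-1)).1 =
                  min (start + 2 * cover + 1) ((A.length : Int) - 1) + 1 := by
                rw [SL_fst]; omega
              rw [hp1]
              -- bounds on s from the B-side window
              have hbi := Gl_bounds A i (min (start + 2 * cover + 1) ((A.length : Int) - 1))
              rw [hgi] at hbi
              rcases hbi with hbi | ⟨hbi1, hbi2⟩
              · exact absurd hbi hs
              exact ih gB _ _ (steps + 1) (by omega) (by omega) (by omega)
                (fun j hj1 hj2 => Gl_above A i j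
                  (min (start + 2 * cover + 1) ((A.length : Int) - 1))
                  (by omega) (by omega) (by rw [hgi]; omega))
                (by omega) (by omega)
          · simp only [if_neg hc]
  

-- ===== VERDICT (by name: the statement is the Claim_ definition above) =====
theorem minLights_spec : Claim_unchanged_minLights := by
  intro A B hDom hnd
  have hne : ¬ A = [] := hnd
  have hn : 1 ≤ (A.length : Int) := by
    have h0 : A.length ≠ 0 := by simpa using hne
    omega
  simp only [minLights, minLights_alt, altLoop]
  rw [if_pos (show (-1 : Int) < (A.length : Int) - 1 by omega)]
  have hlim : (-1 : Int) + 1 + (B - 1) = B - 1 := by ring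
  rw [hlim]
  rw [scanAtLen A (B - 1) 0 (-1) le_rfl]
  have hgi : Gl A 0 (min (B - 1) ((A.length : Int) - 1)) = getLamp A 0 (B - 1) :=
    (getLamp_as_Gl A 0 (B - 1)).symm
  have hq : (SL A (B - 1) 0 (-1)).2 =
      (if getLamp A 0 (B - 1) = -1 then -1 else getLamp A 0 (B - 1)) := by
    rw [SL_snd_eq A _ 0 (-1) le_rfl, hgi]
  by_cases hs : getLamp A 0 (B - 1) = -1
  · rw [if_pos hs, hq, if_pos hs]; simp
  · have hq2 : (SL A (B - 1) 0 (-1)).2 = getLamp A 0 (B - 1) := by rw [hq, if_neg hs]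
    rw [if_neg hs, hq2, if_neg hs]
    have hb' := Gl_bounds A 0 (min (B - 1) ((A.length : Int) - 1))
    rw [hgi] at hb'
    rcases hb' with hb' | ⟨hb1, hb2⟩
    · exact absurd hb' hs
    have hcond : 0 < (A.length : Int) ∧ (0 : Int) ≤ B - 1 := by
      by_contra hcond
      rw [SL_stop A _ 0 (-1) hcond] at hq2
      exact hs hq2.symm
    have hp1 : (SL A (B - 1) 0 (-1)).1 = min (B - 1) ((A.length : Int) - 1) + 1 := by
      rw [SL_fst]; omega
    rw [hp1]
    exact loop_eq A (B - 1) (A.length + 1) A.length _ _ 1 (by omega) (by omega) (by omega)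
      (fun j hj1 hj2 => Gl_above A 0 j (min (B - 1) ((A.length : Int) - 1))
        (by omega) (by omega) (by rw [hgi]; omega))
      (by omega) (by omega)

theorem minLights_empty (B : Int) : minLights [] B = -1 := by
  have h : getLamp [] 0 (B - 1) = -1 := by
    rw [getLamp_as_Gl]
    exact Gl_neg [] 0 _ (by have h0 : (([] : List Int)).length = 0 := rfl; omega)
  simp only [minLights]
  rw [h]
  simp

theorem minLights_alt_empty (B : Int) : minLights_alt [] B = 0 := by
  simp only [minLights_alt, altLoop]
  rw [if_neg (show ¬ ((-1 : Int) < (([] : List Int).length : Int) - 1) by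
    have h0 : (([] : List Int)).length = 0 := rfl; omega)]

theorem minLights_changed : Claim_changed_minLights := by
  unfold Claim_changed_minLights
  refine ⟨by decide, rfl, ?_, ?_, by decide⟩
  · exact minLights_empty 1
  · exact minLights_alt_empty 1

theorem minLights_tight : Claim_exact_minLights := by
  intro A B hDom hD
  have hA : A = [] := hD
  subst hA
  rw [minLights_empty, minLights_alt_empty]
  decide
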